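-- pv_equiv track=rewrite | github.com/JorgeNava/data-structures-and-algorithms | Repeated Words In String.py | countOfNormalizedWordsInText
-- ===== SOURCE A (Python) =====
-- def normalize(word):
--   return word.lower().replace(".", "").replace(",", "").replace("!", "")
--
-- def countOfNormalizedWordsInText(text):
--   words = {}
--   for word in text.split(" "):
--     word = normalize(word)
--     if word in words:
--       words[word] += 1
--     else:
--       words[word] = 1
--   return words
-- ===== SOURCE B (Python) =====
-- def normalize(word):
--   return word.lower().replace(".", "").replace(",", "").replace("!", "")
--
-- def countOfNormalizedWordsInText(text):
--   words = [normalize(w) for w in text.split(" ")]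
--   distinct = list(dict.fromkeys(words))
--   return {w: words.count(w) for w in distinct}
-- ===== Notes on version B (the rewrite author's own statement) =====
-- stated objective: alternative
-- what changed: B normalizes all words up front, deduplicates them in first-occurrence order with dict.fromkeys, and builds the result as a comprehension mapping each distinct word to its total words.count(w), eliminating A's incremental per-occurrence counter updates.
import Mathlib
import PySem

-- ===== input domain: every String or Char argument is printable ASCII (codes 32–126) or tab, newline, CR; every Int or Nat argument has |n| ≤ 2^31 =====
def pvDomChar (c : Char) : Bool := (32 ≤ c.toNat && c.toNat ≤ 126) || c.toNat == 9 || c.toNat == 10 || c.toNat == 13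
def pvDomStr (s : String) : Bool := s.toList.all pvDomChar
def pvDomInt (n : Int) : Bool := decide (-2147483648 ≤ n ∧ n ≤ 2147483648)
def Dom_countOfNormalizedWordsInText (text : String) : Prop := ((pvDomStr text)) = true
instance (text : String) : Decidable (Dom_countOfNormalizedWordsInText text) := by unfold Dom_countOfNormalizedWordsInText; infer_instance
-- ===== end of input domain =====

-- B normalizes up front, deduplicates in first-occurrence order, then maps each distinct
-- word to its total count — no incremental counter; return values proved equal on all inputs.

-- ===== PORT A =====
-- word.lower().replace(".", "").replace(",", "").replace("!", "")
def pvNormalize (word : String) : String :=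
  PySem.Str.replace (PySem.Str.replace (PySem.Str.replace (PySem.Str.lower word) "." "") "," "") "!" ""

-- text.split(" "): sep is the non-empty literal " ", so Str.split? is always some; getD [] is exact here
def pvSplitSpace (text : String) : List String :=
  (PySem.Str.split? text " ").getD []

def countOfNormalizedWordsInText (text : String) : List (String × Int) :=
  ((pvSplitSpace text).foldl
    (fun d word =>
      let w := pvNormalize word
      if d.contains w then d.insert w (d.getD w 0 + 1) else d.insert w 1)
    (PySem.Dict.empty : PySem.Dict String Int)).items

-- ===== PORT B =====
-- list(dict.fromkeys(words)) = the distinct elements of words in first-occurrence order = PySem.Set.ofList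
def countOfNormalizedWordsInText_alt (text : String) : List (String × Int) :=
  let words := (pvSplitSpace text).map pvNormalize
  (PySem.Set.ofList words).map (fun w => (w, ((PySem.List.count words w : Nat) : Int)))

-- ===== PRECONDITION & SPEC =====
def Spec_countOfNormalizedWordsInText (text : String) (out : List (String × Int)) : Prop := out = countOfNormalizedWordsInText_alt text
instance (text : String) (out : List (String × Int)) : Decidable (Spec_countOfNormalizedWordsInText text out) := by unfold Spec_countOfNormalizedWordsInText; infer_instance

-- ===== CLAIM (what is proved, stated in full; the proofs are below) =====
def Claim_equal_countOfNormalizedWordsInText : Prop := ∀ (text : String), Dom_countOfNormalizedWordsInText text → Spec_countOfNormalizedWordsInText text (countOfNormalizedWordsInText text)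

-- ===== LEMMAS AND PROOFS =====

-- A's loop body is exactly the counter step
theorem pvA_step_eq (d : PySem.Dict String Int) (w : String) :
    (if d.contains w then d.insert w (d.getD w 0 + 1) else d.insert w 1)
      = d.insert w (d.getD w 0 + 1) := by
  by_cases h : d.contains w = true
  · simp [h]
  · simp only [Bool.not_eq_true] at h
    rw [PySem.Dict.getD_of_not_contains _ _ h]
    simp [h]

theorem pvA_items (ws : List String) :
    (ws.foldl (fun d w => if d.contains w then d.insert w (d.getD w 0 + 1) else d.insert w 1)
        (PySem.Dict.empty : PySem.Dict String Int)).items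
      = (PySem.Set.ofList ws).map (fun k => (k, (ws.count k : Int))) := by
  have hf : (fun (d : PySem.Dict String Int) (w : String) =>
      if d.contains w then d.insert w (d.getD w 0 + 1) else d.insert w 1)
      = fun d w => d.insert w (d.getD w 0 + 1) := by
    funext d w; exact pvA_step_eq d w
  rw [hf, PySem.Dict.foldl_insert_getD_add_one_eq_counter, PySem.Dict.items_counter]

-- ===== VERDICT (by name: the statement is the Claim_ definition above) =====
theorem countOfNormalizedWordsInText_spec : Claim_equal_countOfNormalizedWordsInText := by
  intro text _
  unfold Spec_countOfNormalizedWordsInText countOfNormalizedWordsInText countOfNormalizedWordsInText_alt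
  simp only []
  rw [← List.foldl_map (f := pvNormalize)
        (g := fun (d : PySem.Dict String Int) w =>
          if d.contains w then d.insert w (d.getD w 0 + 1) else d.insert w 1)
        (l := pvSplitSpace text) (init := PySem.Dict.empty)]
  rw [pvA_items ((pvSplitSpace text).map pvNormalize)]
  simp [PySem.List.count_eq]
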